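-- pv_equiv track=rewrite | github.com/MohammadSeyedabadi/MohammadSeyedabadi.com | src/posts/posts.py | convert_numbers_to_persian
-- ===== SOURCE A (Python) =====
-- def convert_numbers_to_persian(text):
--     """
--     Converts English digits in a string to their Persian equivalents.
--     """
--     mapping = {
--         '0': '۰',
--         '1': '۱',
--         '2': '۲',
--         '3': '۳',
--         '4': '۴',
--         '5': '۵',
--         '6': '۶',
--         '7': '۷',
--         '8': '۸',
--         '9': '۹',
--     }
--     for en_digit, fa_digit in mapping.items():
--         text = text.replace(en_digit, fa_digit)
--     return text
-- ===== SOURCE B (Python) =====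
-- def convert_numbers_to_persian(text):
--     """
--     Converts English digits in a string to their Persian equivalents.
--     """
--     offset = 0x06F0 - ord('0')  # Persian digits are contiguous at U+06F0..U+06F9
--     return ''.join(chr(ord(c) + offset) if '0' <= c <= '9' else c for c in text)
-- ===== Notes on version B (the rewrite author's own statement) =====
-- stated objective: alternative
-- what changed: Replaces the 10-entry mapping dict and ten full-string str.replace passes with a single pass over the characters using a code-point offset (Persian digits are contiguous at U+06F0), so no lookup table exists at all.
import Mathlib
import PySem

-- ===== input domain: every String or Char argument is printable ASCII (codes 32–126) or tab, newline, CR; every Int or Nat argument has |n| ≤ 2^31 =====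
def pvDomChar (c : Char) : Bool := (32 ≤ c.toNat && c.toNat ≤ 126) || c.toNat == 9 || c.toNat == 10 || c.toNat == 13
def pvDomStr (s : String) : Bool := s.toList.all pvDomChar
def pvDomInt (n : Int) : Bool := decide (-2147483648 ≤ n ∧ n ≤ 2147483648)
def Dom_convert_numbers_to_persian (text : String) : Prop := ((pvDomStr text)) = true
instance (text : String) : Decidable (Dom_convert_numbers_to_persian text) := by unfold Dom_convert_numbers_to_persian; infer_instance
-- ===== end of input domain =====

-- B drops the mapping dict entirely: one pass over the characters, shifting each ASCII digit by
-- the fixed code-point offset to the contiguous Persian digit block U+06F0..U+06F9, instead of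
-- A's ten full-string str.replace passes driven by a 10-entry dict; same return value.

-- ===== PORT A =====
def convert_numbers_to_persian (text : String) : String :=
  let mapping : PySem.Dict String String := PySem.Dict.ofList
    [("0", "۰"), ("1", "۱"), ("2", "۲"), ("3", "۳"), ("4", "۴"),
     ("5", "۵"), ("6", "۶"), ("7", "۷"), ("8", "۸"), ("9", "۹")]
  mapping.items.foldl (fun t p => PySem.Str.replace t p.1 p.2) text

-- ===== PORT B =====
-- ''.join over one-char pieces is ported as String.mk of the mapped character list (exact,
-- since every piece is a single character).
def convert_numbers_to_persian_alt (text : String) : String :=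
  let offset : Nat := 0x6F0 - 48
  String.ofList (text.toList.map (fun c =>
    if '0' ≤ c ∧ c ≤ '9' then Char.ofNat (c.toNat + offset) else c))

-- ===== PRECONDITION & SPEC =====
def Spec_convert_numbers_to_persian (text : String) (out : String) : Prop := out = convert_numbers_to_persian_alt text
instance (text : String) (out : String) : Decidable (Spec_convert_numbers_to_persian text out) := by unfold Spec_convert_numbers_to_persian; infer_instance

-- ===== CLAIM =====
def Claim_equal_convert_numbers_to_persian : Prop := ∀ (text : String), Dom_convert_numbers_to_persian text → Spec_convert_numbers_to_persian text (convert_numbers_to_persian text)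

-- ===== LEMMAS AND PROOFS =====

-- the per-character replacement both programs realise
def faChar (c : Char) : Char :=
  if c = '0' then '۰' else if c = '1' then '۱' else if c = '2' then '۲' else
  if c = '3' then '۳' else if c = '4' then '۴' else if c = '5' then '۵' else
  if c = '6' then '۶' else if c = '7' then '۷' else if c = '8' then '۸' else
  if c = '9' then '۹' else c

-- str.replace with a one-char needle and a one-char replacement is a character map
theorem replace_go_single (d f : Char) (fuel : Nat) (l acc : List Char)
    (h : l.length ≤ fuel) :
    PySem.Chars.replace.go [d] [f] fuel l acc
      = acc.reverse ++ l.map (fun c => if c = d then f else c) := by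
  induction fuel generalizing l acc with
  | zero =>
    have : l = [] := List.length_eq_zero_iff.mp (Nat.le_zero.mp h)
    subst this; simp [PySem.Chars.replace.go]
  | succ n ih =>
    cases l with
    | nil => simp [PySem.Chars.replace.go]
    | cons c t =>
      by_cases hc : c = d
      · subst hc
        have hstep : PySem.Chars.replace.go [c] [f] (n+1) (c :: t) acc
            = PySem.Chars.replace.go [c] [f] n t ([f].reverse ++ acc) := by
          simp [PySem.Chars.replace.go, List.isPrefixOf]
        rw [hstep, ih t _ (by simpa using h)]
        simp
      · have hbeq : (d == c) = false := by
          simp only [beq_eq_false_iff_ne, ne_eq]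
          exact fun hh => hc hh.symm
        have hstep : PySem.Chars.replace.go [d] [f] (n+1) (c :: t) acc
            = PySem.Chars.replace.go [d] [f] n t (c :: acc) := by
          simp [PySem.Chars.replace.go, List.isPrefixOf, hbeq]
        rw [hstep, ih t _ (by simpa using h)]
        simp [hc]

theorem replace_single (s : List Char) (d f : Char) :
    PySem.Chars.replace s [d] [f] = s.map (fun c => if c = d then f else c) := by
  rw [PySem.Chars.replace]
  simpa using replace_go_single d f s.length s [] le_rfl

theorem str_replace_single (s : String) (d f : Char) :
    (PySem.Str.replace s d.toString f.toString).toList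
      = s.toList.map (fun c => if c = d then f else c) := by
  rw [PySem.Str.toList_replace]
  have hd : (d.toString).toList = [d] := by simp
  have hf : (f.toString).toList = [f] := by simp
  rw [hd, hf, replace_single]

theorem A_toList (text : String) :
    (convert_numbers_to_persian text).toList = text.toList.map faChar := by
  have e : convert_numbers_to_persian text
      = PySem.Str.replace (PySem.Str.replace (PySem.Str.replace (PySem.Str.replace
        (PySem.Str.replace (PySem.Str.replace (PySem.Str.replace (PySem.Str.replace
        (PySem.Str.replace (PySem.Str.replace text '0'.toString '۰'.toString)
        '1'.toString '۱'.toString) '2'.toString '۲'.toString) '3'.toString '۳'.toString)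
        '4'.toString '۴'.toString) '5'.toString '۵'.toString) '6'.toString '۶'.toString)
        '7'.toString '۷'.toString) '8'.toString '۸'.toString) '9'.toString '۹'.toString := by
    unfold convert_numbers_to_persian
    rfl
  rw [e]
  rw [str_replace_single, str_replace_single, str_replace_single, str_replace_single,
      str_replace_single, str_replace_single, str_replace_single, str_replace_single,
      str_replace_single, str_replace_single]
  generalize text.toList = l
  induction l with
  | nil => simp
  | cons c t ih =>
    simp only [List.map_cons]
    rw [ih]
    refine congrArg₂ List.cons ?_ rfl
    by_cases h0 : c = '0'; · subst h0; decide
    by_cases h1 : c = '1'; · subst h1; decide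
    by_cases h2 : c = '2'; · subst h2; decide
    by_cases h3 : c = '3'; · subst h3; decide
    by_cases h4 : c = '4'; · subst h4; decide
    by_cases h5 : c = '5'; · subst h5; decide
    by_cases h6 : c = '6'; · subst h6; decide
    by_cases h7 : c = '7'; · subst h7; decide
    by_cases h8 : c = '8'; · subst h8; decide
    by_cases h9 : c = '9'; · subst h9; decide
    simp [faChar, h0, h1, h2, h3, h4, h5, h6, h7, h8, h9]

theorem shift_eq_faChar (c : Char) :
    (if '0' ≤ c ∧ c ≤ '9' then Char.ofNat (c.toNat + (0x6F0 - 48)) else c) = faChar c := by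
  by_cases h0 : c = '0'; · subst h0; decide
  by_cases h1 : c = '1'; · subst h1; decide
  by_cases h2 : c = '2'; · subst h2; decide
  by_cases h3 : c = '3'; · subst h3; decide
  by_cases h4 : c = '4'; · subst h4; decide
  by_cases h5 : c = '5'; · subst h5; decide
  by_cases h6 : c = '6'; · subst h6; decide
  by_cases h7 : c = '7'; · subst h7; decide
  by_cases h8 : c = '8'; · subst h8; decide
  by_cases h9 : c = '9'; · subst h9; decide
  have hnd : ¬ ('0' ≤ c ∧ c ≤ '9') := by
    rintro ⟨hl, hr⟩
    have hl' : (48 : Nat) ≤ c.toNat := Fin.mk_le_mk.mp hl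
    have hr' : c.toNat ≤ 57 := Fin.mk_le_mk.mp hr
    have k0 : c.toNat ≠ 48 := fun h => h0 (by rw [← Char.ofNat_toNat c, h])
    have k1 : c.toNat ≠ 49 := fun h => h1 (by rw [← Char.ofNat_toNat c, h])
    have k2 : c.toNat ≠ 50 := fun h => h2 (by rw [← Char.ofNat_toNat c, h])
    have k3 : c.toNat ≠ 51 := fun h => h3 (by rw [← Char.ofNat_toNat c, h])
    have k4 : c.toNat ≠ 52 := fun h => h4 (by rw [← Char.ofNat_toNat c, h])
    have k5 : c.toNat ≠ 53 := fun h => h5 (by rw [← Char.ofNat_toNat c, h])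
    have k6 : c.toNat ≠ 54 := fun h => h6 (by rw [← Char.ofNat_toNat c, h])
    have k7 : c.toNat ≠ 55 := fun h => h7 (by rw [← Char.ofNat_toNat c, h])
    have k8 : c.toNat ≠ 56 := fun h => h8 (by rw [← Char.ofNat_toNat c, h])
    have k9 : c.toNat ≠ 57 := fun h => h9 (by rw [← Char.ofNat_toNat c, h])
    omega
  simp [faChar, hnd, h0, h1, h2, h3, h4, h5, h6, h7, h8, h9]

theorem B_toList (text : String) :
    (convert_numbers_to_persian_alt text).toList = text.toList.map faChar := by
  unfold convert_numbers_to_persian_alt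
  simp only [String.toList_ofList, shift_eq_faChar]

-- ===== VERDICT =====
theorem convert_numbers_to_persian_spec : Claim_equal_convert_numbers_to_persian := by
  intro text _
  unfold Spec_convert_numbers_to_persian
  exact String.toList_inj.mp ((A_toList text).trans (B_toList text).symm)
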